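-- pv_equiv track=rewrite | github.com/NairaAhmedAI/MediMine-Application | scraper_fapi.py | map_sections
-- ===== SOURCE A (Python) =====
-- keyword_map = {
--     "symptoms": [
--         "symptom", "sign", "stages", "types", "pain", "swelling", "stiffness", "bruising",
--         "discomfort", "ache", "common signs", "talking about", "what happened",
--         "symptoms of", "in leukaemia", "acute leukaemia", "looking paler than usual",
--         "feeling tired", "anaemia", "bruises", "may bruise more easily"
--     ],
--     "causes": [
--         "cause", "risk factor", "what causes", "fracture", "injury", "smoking",
--         "developed", "reaction", "drink alcohol", "exposure to", "the cause or causes of"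
--     ],
--     "diagnosis": [
--         "diagnos", "test", "screen", "procedure", "scan", "x-ray", "assessment", "examination",
--         "testing", "tests", "challenge"
--     ],
--     "warnings": [
--         "emergency", "warning", "seek medical advice", "complications", "when to get medical help",
--         "fall", "risk", "not improved", "driving", "hospital", "avoid", "dial 999",
--         "get medical advice", "is spread"
--     ],
--     "recommendations": [
--         "treat", "recommend", "manage", "self-care", "prevention", "work", "recovery", "exercise",
--         "rehabilitation", "massage", "raise", "balance", "diet", "active", "stop smoking",
--         "return", "healthcare professional", "what to do", "who is affected", "injections",
--         "support", "is treated", "lifestyle", "how to do tasks at home", "vaccination",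
--         "find your local services", "care homes"
--     ]
-- }
--
-- def map_sections(sections: dict, condition_name: str):
--     """Process and structure scraped NHS data."""
--     mapped = {k: set() for k in keyword_map.keys()}  # sets to prevent duplicates
--
--
--     for title, content in sections.items():
--         title_lower = title.lower()
--         content_text = " ".join(content)
--
--         for category, keywords in keyword_map.items():
--             if any(kw in title_lower for kw in keywords):
--                 mapped[category].add(content_text)
--                 break
--
--     for title, content in sections.items():
--         title_lower = title.lower()
--         if not any(kw in title_lower for kws in keyword_map.values() for kw in kws):
--             content_text = " ".join(content)
--             sentences = content_text.split(".")
--             for sent in sentences: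
--                 sent_lower = sent.lower().strip()
--                 if not sent_lower:
--                     continue
--                 for category, keywords in keyword_map.items():
--                     if any(kw in sent_lower for kw in keywords):
--                         mapped[category].add(sent.strip())
--                         break
--
--
--     for cat in mapped:
--         mapped[cat] = " ".join(sorted(mapped[cat]))
--
--     return mapped
-- ===== SOURCE B (Python) =====
-- keyword_map = {
--     "symptoms": [
--         "symptom", "sign", "stages", "types", "pain", "swelling", "stiffness", "bruising",
--         "discomfort", "ache", "common signs", "talking about", "what happened",
--         "symptoms of", "in leukaemia", "acute leukaemia", "looking paler than usual",
--         "feeling tired", "anaemia", "bruises", "may bruise more easily"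
--     ],
--     "causes": [
--         "cause", "risk factor", "what causes", "fracture", "injury", "smoking",
--         "developed", "reaction", "drink alcohol", "exposure to", "the cause or causes of"
--     ],
--     "diagnosis": [
--         "diagnos", "test", "screen", "procedure", "scan", "x-ray", "assessment", "examination",
--         "testing", "tests", "challenge"
--     ],
--     "warnings": [
--         "emergency", "warning", "seek medical advice", "complications", "when to get medical help",
--         "fall", "risk", "not improved", "driving", "hospital", "avoid", "dial 999",
--         "get medical advice", "is spread"
--     ],
--     "recommendations": [
--         "treat", "recommend", "manage", "self-care", "prevention", "work", "recovery", "exercise",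
--         "rehabilitation", "massage", "raise", "balance", "diet", "active", "stop smoking",
--         "return", "healthcare professional", "what to do", "who is affected", "injections",
--         "support", "is treated", "lifestyle", "how to do tasks at home", "vaccination",
--         "find your local services", "care homes"
--     ]
-- }
--
--
-- def map_sections(sections: dict, condition_name: str):
--     """Process and structure scraped NHS data (category-major claim sweeps)."""
--     pool = [(title.lower(), " ".join(content)) for title, content in sections.items()]
--     claimed = {cat: set() for cat in keyword_map}
--
--     # Sweep 1: each category, in keyword_map order, claims the whole-section
--     # texts whose lowercased title it matches; claimed items leave the pool,
--     # so every section ends up in its first matching category.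
--     for cat, kws in keyword_map.items():
--         rest = []
--         for low, text in pool:
--             if any(kw in low for kw in kws):
--                 claimed[cat].add(text)
--             else:
--                 rest.append((low, text))
--         pool = rest
--
--     # Sections still in the pool matched no category at all: split them into
--     # sentences and run the same claim sweep over the sentence pool.
--     spool = [(sent.lower().strip(), sent.strip())
--              for _, text in pool
--              for sent in text.split(".")
--              if sent.lower().strip()]
--     for cat, kws in keyword_map.items():
--         rest = []
--         for low, sent in spool:
--             if any(kw in low for kw in kws):
--                 claimed[cat].add(sent)
--             else:
--                 rest.append((low, sent))
--         spool = rest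
--
--     return {cat: " ".join(sorted(texts)) for cat, texts in claimed.items()}
-- ===== Notes on version B (the rewrite author's own statement) =====
-- stated objective: alternative
-- what changed: B inverts the loop nesting: instead of A's per-text inner scan over the keyword table with a break, B runs category-major claim sweeps -- each category, in order, claims and removes from a shrinking pool the titles (then, for leftover sections, the sentences) it matches, which preserves first-match semantics because earlier categories have already removed their items.
import Mathlib
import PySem

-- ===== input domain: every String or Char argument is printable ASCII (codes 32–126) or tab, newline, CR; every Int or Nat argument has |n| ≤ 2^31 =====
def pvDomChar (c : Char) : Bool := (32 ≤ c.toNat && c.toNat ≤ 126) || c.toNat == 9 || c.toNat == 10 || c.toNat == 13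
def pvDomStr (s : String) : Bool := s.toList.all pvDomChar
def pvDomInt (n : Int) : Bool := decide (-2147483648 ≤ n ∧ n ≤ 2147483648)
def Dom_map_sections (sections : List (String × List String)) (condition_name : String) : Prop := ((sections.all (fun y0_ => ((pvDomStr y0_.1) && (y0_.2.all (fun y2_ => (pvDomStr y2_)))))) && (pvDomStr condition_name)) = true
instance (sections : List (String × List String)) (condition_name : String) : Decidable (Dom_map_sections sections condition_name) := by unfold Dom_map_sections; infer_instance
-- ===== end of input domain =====

-- B inverts the loop nesting: category-major claim sweeps over a shrinking pool of titles, then of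
-- sentences, instead of A's per-text first-match scans; same return value (neither mutates its argument).

-- ===== PORT A =====
def keywordMap : List (String × List String) := [
  ("symptoms", ["symptom", "sign", "stages", "types", "pain", "swelling", "stiffness", "bruising",
    "discomfort", "ache", "common signs", "talking about", "what happened",
    "symptoms of", "in leukaemia", "acute leukaemia", "looking paler than usual",
    "feeling tired", "anaemia", "bruises", "may bruise more easily"]),
  ("causes", ["cause", "risk factor", "what causes", "fracture", "injury", "smoking",
    "developed", "reaction", "drink alcohol", "exposure to", "the cause or causes of"]),
  ("diagnosis", ["diagnos", "test", "screen", "procedure", "scan", "x-ray", "assessment", "examination",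
    "testing", "tests", "challenge"]),
  ("warnings", ["emergency", "warning", "seek medical advice", "complications", "when to get medical help",
    "fall", "risk", "not improved", "driving", "hospital", "avoid", "dial 999",
    "get medical advice", "is spread"]),
  ("recommendations", ["treat", "recommend", "manage", "self-care", "prevention", "work", "recovery", "exercise",
    "rehabilitation", "massage", "raise", "balance", "diet", "active", "stop smoking",
    "return", "healthcare professional", "what to do", "who is affected", "injections",
    "support", "is treated", "lifestyle", "how to do tasks at home", "vaccination",
    "find your local services", "care homes"])]

-- A's inner 'for category, keywords in keyword_map.items(): if any(...): mapped[category].add(txt); break'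
def addFirstMatch : List (String × List String) → PySem.Dict String (PySem.Set String) → String → String → PySem.Dict String (PySem.Set String)
  | [], d, _, _ => d
  | (category, kws) :: rest, d, tl, txt =>
      if kws.any (fun kw => PySem.Str.isIn kw tl) then d.modify category [] (fun s => PySem.Set.add s txt)
      else addFirstMatch rest d tl txt

-- 'mapped = {k: set() for k in keyword_map.keys()}'
def initMapped : PySem.Dict String (PySem.Set String) :=
  PySem.Dict.ofList (keywordMap.map (fun p => (p.1, ([] : PySem.Set String))))

def map_sections (sections : List (String × List String)) (condition_name : String) : List (String × String) :=
  let m1 := sections.foldl (fun d sec =>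
      addFirstMatch keywordMap d (PySem.Str.lower sec.1) (PySem.Str.join " " sec.2)) initMapped
  let m2 := sections.foldl (fun d sec =>
      let tl := PySem.Str.lower sec.1
      if keywordMap.any (fun p => p.2.any (fun kw => PySem.Str.isIn kw tl)) then d
      else
        -- content_text.split("."): the separator "." is a nonempty literal, so split? is always `some`
        ((PySem.Str.split? (PySem.Str.join " " sec.2) ".").getD []).foldl (fun d sent =>
          let sl := PySem.Str.strip (PySem.Str.lower sent)
          if sl = "" then d else addFirstMatch keywordMap d sl (PySem.Str.strip sent)) d) m1
  m2.items.map (fun p => (p.1, PySem.Str.join " " (PySem.List.sorted p.2 (fun x => x) false)))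

-- ===== PORT B =====
-- 'claimed = {cat: set() for cat in keyword_map}'
def initClaimed : PySem.Dict String (PySem.Set String) :=
  PySem.Dict.ofList (keywordMap.map (fun p => (p.1, ([] : PySem.Set String))))

-- B's claim sweep: 'for cat, kws in keyword_map.items(): rest = []; for low, t in pool: ... ; pool = rest'
def claimSweep : List (String × List String) → List (String × String) → PySem.Dict String (PySem.Set String) → PySem.Dict String (PySem.Set String) × List (String × String)
  | [], pool, claimed => (claimed, pool)
  | (cat, kws) :: cats, pool, claimed =>
      let st := pool.foldl (fun (acc : PySem.Dict String (PySem.Set String) × List (String × String)) q =>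
          if kws.any (fun kw => PySem.Str.isIn kw q.1) then
            (acc.1.modify cat [] (fun s => PySem.Set.add s q.2), acc.2)
          else (acc.1, acc.2 ++ [q])) (claimed, [])
      claimSweep cats st.2 st.1

def map_sections_alt (sections : List (String × List String)) (condition_name : String) : List (String × String) :=
  let pool := sections.map (fun sec => (PySem.Str.lower sec.1, PySem.Str.join " " sec.2))
  let r1 := claimSweep keywordMap pool initClaimed
  let spool := r1.2.flatMap (fun q =>
      ((PySem.Str.split? q.2 ".").getD []).filterMap (fun sent =>
        if PySem.Str.strip (PySem.Str.lower sent) = "" then none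
        else some (PySem.Str.strip (PySem.Str.lower sent), PySem.Str.strip sent)))
  let r2 := claimSweep keywordMap spool r1.1
  r2.1.items.map (fun p => (p.1, PySem.Str.join " " (PySem.List.sorted p.2 (fun x => x) false)))

-- ===== PRECONDITION & SPEC =====
def Spec_map_sections (sections : List (String × List String)) (condition_name : String) (out : List (String × String)) : Prop := out = map_sections_alt sections condition_name
instance (sections : List (String × List String)) (condition_name : String) (out : List (String × String)) : Decidable (Spec_map_sections sections condition_name out) := by unfold Spec_map_sections; infer_instance

-- ===== CLAIM (what is proved, stated in full; the proofs are below) =====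
def Claim_equal_map_sections : Prop := ∀ (sections : List (String × List String)) (condition_name : String), Dom_map_sections sections condition_name → Spec_map_sections sections condition_name (map_sections sections condition_name)

-- ===== LEMMAS AND PROOFS =====

-- the single dict update both programs perform, as a step function over (category, text) pairs
def mstep (d : PySem.Dict String (PySem.Set String)) (q : String × String) : PySem.Dict String (PySem.Set String) :=
  d.modify q.1 [] (fun s => PySem.Set.add s q.2)

-- first category (in keyword_map order) whose keywords match the text, if any
def firstCategory : List (String × List String) → String → Option String
  | [], _ => none
  | (category, kws) :: rest, text =>
      if kws.any (fun kw => PySem.Str.isIn kw text) then some category else firstCategory rest text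

-- the optional tag a section's title produces
def g1 (sec : String × List String) : Option (String × String) :=
  (firstCategory keywordMap (PySem.Str.lower sec.1)).map (fun c => (c, PySem.Str.join " " sec.2))

-- the optional tag a sentence produces
def gS (sent : String) : Option (String × String) :=
  if PySem.Str.strip (PySem.Str.lower sent) = "" then none
  else (firstCategory keywordMap (PySem.Str.strip (PySem.Str.lower sent))).map (fun c => (c, PySem.Str.strip sent))

def sentencePairs (content_text : String) : List (String × String) :=
  ((PySem.Str.split? content_text ".").getD []).filterMap gS

def tags1 (sections : List (String × List String)) : List (String × String) := sections.filterMap g1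

def tags2 (sections : List (String × List String)) : List (String × String) :=
  sections.flatMap (fun sec =>
    match firstCategory keywordMap (PySem.Str.lower sec.1) with
    | some _ => []
    | none => sentencePairs (PySem.Str.join " " sec.2))

-- the optional tag a pooled (lowered, text) pair produces under a keyword list
def fcPair (cats : List (String × List String)) (q : String × String) : Option (String × String) :=
  (firstCategory cats q.1).map (fun k => (k, q.2))

-- the (category, text) sweepTags a sweep over `cats` performs on `pool`, in sweep order
def sweepTags : List (String × List String) → List (String × String) → List (String × String)
  | [], _ => []
  | (cat, kws) :: cats, pool =>
      (pool.filter (fun q => kws.any (fun kw => PySem.Str.isIn kw q.1))).map (fun q => (cat, q.2))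
        ++ sweepTags cats (pool.filter (fun q => !kws.any (fun kw => PySem.Str.isIn kw q.1)))

lemma addFirstMatch_eq (kwm : List (String × List String)) (d : PySem.Dict String (PySem.Set String)) (tl txt : String) :
    addFirstMatch kwm d tl txt =
      match firstCategory kwm tl with
      | some c => mstep d (c, txt)
      | none => d := by
  induction kwm generalizing d with
  | nil => rfl
  | cons p rest ih =>
      obtain ⟨category, kws⟩ := p
      simp only [addFirstMatch, firstCategory]
      split_ifs with h <;> simp [mstep, ih]

lemma any_eq_isSome (kwm : List (String × List String)) (tl : String) :
    (kwm.any (fun p => p.2.any (fun kw => PySem.Str.isIn kw tl))) = (firstCategory kwm tl).isSome := by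
  induction kwm with
  | nil => rfl
  | cons p rest ih =>
      obtain ⟨category, kws⟩ := p
      simp only [List.any_cons, firstCategory]
      by_cases h : (kws.any fun kw => PySem.Str.isIn kw tl) = true
      · rw [if_pos h, h, Bool.true_or, Option.isSome_some]
      · rw [if_neg h, Bool.not_eq_true] at *
        rw [h, Bool.false_or, ih]

lemma foldl_opt_mstep {α : Type} (g : α → Option (String × String)) (l : List α) (d : PySem.Dict String (PySem.Set String)) :
    l.foldl (fun d x => (g x).elim d (mstep d)) d
      = (l.filterMap g).foldl mstep d := by
  induction l generalizing d with
  | nil => rfl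
  | cons x xs ih =>
      simp only [List.foldl_cons, List.filterMap_cons]
      cases h : g x <;> simp [h, ih]

lemma foldl_flatMap_mstep {α : Type} (h : α → List (String × String)) (l : List α) (d : PySem.Dict String (PySem.Set String)) :
    l.foldl (fun d x => (h x).foldl mstep d) d = (l.flatMap h).foldl mstep d := by
  induction l generalizing d with
  | nil => rfl
  | cons x xs ih => simp [List.flatMap_cons, List.foldl_append, ih]

lemma getD_foldl_mstep (l : List (String × String)) (d : PySem.Dict String (PySem.Set String)) (c : String) :
    (l.foldl mstep d).getD c []
      = ((l.filter (fun q => q.1 == c)).map (fun q => q.2)).foldl PySem.Set.add (d.getD c []) := by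
  induction l generalizing d with
  | nil => rfl
  | cons q rest ih =>
      simp only [List.foldl_cons, List.filter_cons]
      by_cases hqc : q.1 = c
      · subst hqc
        rw [ih]
        simp [mstep, PySem.Dict.getD_modify]
      · have hbeq : (q.1 == c) = false := by simp [hqc]
        rw [ih]
        simp [hbeq, mstep, PySem.Dict.getD_modify, Ne.symm hqc]

lemma firstCategory_mem {kwm : List (String × List String)} {t c : String}
    (h : firstCategory kwm t = some c) : c ∈ kwm.map (fun p => p.1) := by
  induction kwm with
  | nil => simp [firstCategory] at h
  | cons p rest ih =>
      obtain ⟨category, kws⟩ := p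
      simp only [firstCategory] at h
      split_ifs at h with hc
      · simp at h; simp [h]
      · simpa using Or.inr (ih h)

lemma update_of_subset (s : PySem.Set String) (l : List String) (h : ∀ x ∈ l, x ∈ s) :
    PySem.Set.update s l = s := by
  induction l generalizing s with
  | nil => rfl
  | cons x xs ih =>
      have hc : PySem.Set.contains s x = true := by
        simp only [PySem.Set.contains]
        exact List.contains_iff_mem.2 (h x (by simp))
      have hx : PySem.Set.add s x = s := by
        simp only [PySem.Set.add, hc, if_true]
      simp only [PySem.Set.update, List.foldl_cons, hx]
      exact ih s (fun y hy => h y (by simp [hy]))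

-- A's first pass ∘ second pass equals one mstep-fold over tags1 ++ tags2
lemma m2_eq (sections : List (String × List String)) :
    (sections.foldl (fun d sec =>
      let tl := PySem.Str.lower sec.1
      if keywordMap.any (fun p => p.2.any (fun kw => PySem.Str.isIn kw tl)) then d
      else
        ((PySem.Str.split? (PySem.Str.join " " sec.2) ".").getD []).foldl (fun d sent =>
          let sl := PySem.Str.strip (PySem.Str.lower sent)
          if sl = "" then d else addFirstMatch keywordMap d sl (PySem.Str.strip sent)) d)
      (sections.foldl (fun d sec =>
        addFirstMatch keywordMap d (PySem.Str.lower sec.1) (PySem.Str.join " " sec.2)) initMapped))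
    = (tags1 sections ++ tags2 sections).foldl mstep initMapped := by
  have h1 : (fun (d : PySem.Dict String (PySem.Set String)) (sec : String × List String) =>
      addFirstMatch keywordMap d (PySem.Str.lower sec.1) (PySem.Str.join " " sec.2))
      = (fun d sec => (g1 sec).elim d (mstep d)) := by
    funext d sec
    rw [addFirstMatch_eq]
    simp only [g1]
    cases hfc : firstCategory keywordMap (PySem.Str.lower sec.1) <;> simp [hfc]
  have hinner : ∀ (ct : String) (d : PySem.Dict String (PySem.Set String)),
      ((PySem.Str.split? ct ".").getD []).foldl (fun d sent =>
        let sl := PySem.Str.strip (PySem.Str.lower sent)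
        if sl = "" then d else addFirstMatch keywordMap d sl (PySem.Str.strip sent)) d
      = (sentencePairs ct).foldl mstep d := by
    intro ct d
    have hstep : (fun (d : PySem.Dict String (PySem.Set String)) sent =>
        let sl := PySem.Str.strip (PySem.Str.lower sent)
        if sl = "" then d else addFirstMatch keywordMap d sl (PySem.Str.strip sent))
        = (fun d sent => (gS sent).elim d (mstep d)) := by
      funext d sent
      simp only [gS]
      by_cases h : PySem.Str.strip (PySem.Str.lower sent) = ""
      · simp [h]
      · simp only [h, if_false]
        rw [addFirstMatch_eq]
        cases hfc : firstCategory keywordMap (PySem.Str.strip (PySem.Str.lower sent)) <;> simp [hfc]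
    rw [hstep, foldl_opt_mstep gS]
    rfl
  have h2 : (fun (d : PySem.Dict String (PySem.Set String)) (sec : String × List String) =>
      let tl := PySem.Str.lower sec.1
      if keywordMap.any (fun p => p.2.any (fun kw => PySem.Str.isIn kw tl)) then d
      else
        ((PySem.Str.split? (PySem.Str.join " " sec.2) ".").getD []).foldl (fun d sent =>
          let sl := PySem.Str.strip (PySem.Str.lower sent)
          if sl = "" then d else addFirstMatch keywordMap d sl (PySem.Str.strip sent)) d)
      = (fun d sec =>
          (match firstCategory keywordMap (PySem.Str.lower sec.1) with
           | some _ => ([] : List (String × String))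
           | none => sentencePairs (PySem.Str.join " " sec.2)).foldl mstep d) := by
    funext d sec
    simp only [any_eq_isSome]
    cases hfc : firstCategory keywordMap (PySem.Str.lower sec.1)
    · simp only [hfc, Option.isSome_none, Bool.false_eq_true, if_false]
      exact hinner _ d
    · simp [hfc]
  rw [h1, foldl_opt_mstep g1, h2, foldl_flatMap_mstep, ← List.foldl_append]
  rfl

lemma getD_initMapped {c : String} (h : c ∈ keywordMap.map (fun p => p.1)) :
    initMapped.getD c [] = ([] : PySem.Set String) := by
  simp only [keywordMap, List.map_cons, List.map_nil, List.mem_cons, List.not_mem_nil, or_false] at h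
  rcases h with h | h | h | h | h <;> subst h <;> decide

lemma keys_initMapped : initMapped.keys = keywordMap.map (fun p => p.1) := by decide

lemma keys_m2 (l : List (String × String)) (h : ∀ q ∈ l, q.1 ∈ keywordMap.map (fun p => p.1)) :
    (l.foldl mstep initMapped).keys = keywordMap.map (fun p => p.1) := by
  have := PySem.Dict.keys_foldl_modify_key l (fun q => q.1) ([] : PySem.Set String)
      (fun _ q => fun s => PySem.Set.add s q.2) initMapped
  rw [show (fun (d : PySem.Dict String (PySem.Set String)) (x : String × String) =>
        d.modify x.1 [] ((fun _ q => fun s => PySem.Set.add s q.2) d x)) = mstep from rfl] at this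
  rw [this, keys_initMapped, update_of_subset]
  intro x hx
  rcases List.mem_map.1 hx with ⟨q, hq, rfl⟩
  exact h q hq

lemma tags_keys_mem (sections : List (String × List String)) :
    ∀ q ∈ tags1 sections ++ tags2 sections, q.1 ∈ keywordMap.map (fun p => p.1) := by
  intro q hq
  rcases List.mem_append.1 hq with h | h
  · rcases List.mem_filterMap.1 h with ⟨sec, _, hg⟩
    simp only [g1, Option.map_eq_some_iff] at hg
    obtain ⟨c, hc, rfl⟩ := hg
    exact firstCategory_mem hc
  · rcases List.mem_flatMap.1 h with ⟨sec, _, hg⟩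
    cases hfc : firstCategory keywordMap (PySem.Str.lower sec.1) with
    | some c => rw [hfc] at hg; simp at hg
    | none =>
        rw [hfc] at hg
        rcases List.mem_filterMap.1 hg with ⟨sent, _, hgs⟩
        simp only [gS] at hgs
        split_ifs at hgs
        simp only [Option.map_eq_some_iff] at hgs
        obtain ⟨c, hc, rfl⟩ := hgs
        exact firstCategory_mem hc

-- ----- B-side lemmas -----

lemma initClaimed_eq : initClaimed = initMapped := rfl

-- the inner pool loop of one sweep
lemma claim_fold_eq (cat : String) (kws : List String) (pool : List (String × String))
    (d : PySem.Dict String (PySem.Set String)) (acc : List (String × String)) :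
    pool.foldl (fun (a : PySem.Dict String (PySem.Set String) × List (String × String)) q =>
        if kws.any (fun kw => PySem.Str.isIn kw q.1) then
          (a.1.modify cat [] (fun s => PySem.Set.add s q.2), a.2)
        else (a.1, a.2 ++ [q])) (d, acc)
    = (((pool.filter (fun q => kws.any (fun kw => PySem.Str.isIn kw q.1))).map (fun q => (cat, q.2))).foldl mstep d,
       acc ++ pool.filter (fun q => !kws.any (fun kw => PySem.Str.isIn kw q.1))) := by
  induction pool generalizing d acc with
  | nil => simp
  | cons q pool ih =>
      simp only [List.foldl_cons, List.filter_cons]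
      cases h : (kws.any fun kw => PySem.Str.isIn kw q.1)
      · simp only [h, Bool.false_eq_true, if_false, Bool.not_false, if_true, ite_true]
        rw [ih]
        simp
      · simp only [h, if_true, Bool.not_true, Bool.false_eq_true, if_false, ite_true]
        rw [ih]
        rfl

lemma claimSweep_eq (cats : List (String × List String)) (pool : List (String × String))
    (d : PySem.Dict String (PySem.Set String)) :
    claimSweep cats pool d
      = ((sweepTags cats pool).foldl mstep d,
         pool.filter (fun q => (firstCategory cats q.1).isNone)) := by
  induction cats generalizing pool d with
  | nil => simp [claimSweep, sweepTags, firstCategory]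
  | cons p cats ih =>
      obtain ⟨cat, kws⟩ := p
      simp only [claimSweep, claim_fold_eq, sweepTags]
      rw [ih, List.foldl_append, List.nil_append, List.filter_filter]
      congr 1
      apply List.filter_congr
      intro q _
      simp only [firstCategory]
      cases h : (kws.any fun kw => PySem.Str.isIn kw q.1) <;> simp [h]

lemma sweepTags_cat_mem (cats : List (String × List String)) (pool : List (String × String)) :
    ∀ q ∈ sweepTags cats pool, q.1 ∈ cats.map (fun p => p.1) := by
  induction cats generalizing pool with
  | nil => simp [sweepTags]
  | cons p cats ih =>
      obtain ⟨cat, kws⟩ := p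
      intro q hq
      rcases List.mem_append.1 hq with h | h
      · rcases List.mem_map.1 h with ⟨r, _, rfl⟩
        simp
      · simpa using Or.inr (ih _ q h)

lemma filterMap_fcPair_filter_self (cat : String) (kws : List String) (cats : List (String × List String))
    (hcat : cat ∉ cats.map (fun p => p.1)) (pool : List (String × String)) :
    ((pool.filterMap (fcPair ((cat, kws) :: cats))).filter (fun q => q.1 == cat))
      = (pool.filter (fun q => kws.any (fun kw => PySem.Str.isIn kw q.1))).map (fun q => (cat, q.2)) := by
  induction pool with
  | nil => rfl
  | cons q pool ih =>
      cases h : (kws.any fun kw => PySem.Str.isIn kw q.1)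
      · cases hfc : firstCategory cats q.1 with
        | none =>
            rw [List.filterMap_cons_none (by simp only [fcPair, firstCategory, h, Bool.false_eq_true, if_false, hfc, Option.map_none, Option.map_some]),
                List.filter_cons]
            simp only [h, Bool.false_eq_true, if_false]
            exact ih
        | some k =>
            have hk : ((k, q.2).1 == cat) = false := by
              simp only [beq_eq_false_iff_ne, ne_eq]
              intro hkc; exact hcat (hkc ▸ firstCategory_mem hfc)
            rw [List.filterMap_cons_some (b := (k, q.2)) (by simp only [fcPair, firstCategory, h, Bool.false_eq_true, if_false, hfc, Option.map_none, Option.map_some]),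
                List.filter_cons, List.filter_cons]
            simp only [h, hk, Bool.false_eq_true, if_false]
            exact ih
      · rw [List.filterMap_cons_some (b := (cat, q.2)) (by simp only [fcPair, firstCategory, h, eq_self_iff_true, if_true, Option.map_some]),
            List.filter_cons, List.filter_cons]
        simp only [h, if_true, beq_self_eq_true, ite_true, List.map_cons]
        exact congrArg _ ih

lemma filterMap_fcPair_filter_other (cat : String) (kws : List String) (cats : List (String × List String))
    (c : String) (hc : c ≠ cat) (pool : List (String × String)) :
    ((pool.filterMap (fcPair ((cat, kws) :: cats))).filter (fun q => q.1 == c))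
      = (((pool.filter (fun q => !kws.any (fun kw => PySem.Str.isIn kw q.1))).filterMap (fcPair cats)).filter (fun q => q.1 == c)) := by
  induction pool with
  | nil => rfl
  | cons q pool ih =>
      cases h : (kws.any fun kw => PySem.Str.isIn kw q.1)
      · rw [List.filter_cons]
        simp only [h, Bool.not_false, if_true, ite_true]
        cases hfc : firstCategory cats q.1 with
        | none =>
            rw [List.filterMap_cons_none (f := fcPair ((cat, kws) :: cats)) (by simp only [fcPair, firstCategory, h, Bool.false_eq_true, if_false, hfc, Option.map_none, Option.map_some]),
                List.filterMap_cons_none (f := fcPair cats) (by simp only [fcPair, hfc, Option.map_none, Option.map_some])]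
            exact ih
        | some k =>
            rw [List.filterMap_cons_some (f := fcPair ((cat, kws) :: cats)) (b := (k, q.2)) (by simp only [fcPair, firstCategory, h, Bool.false_eq_true, if_false, hfc, Option.map_none, Option.map_some]),
                List.filterMap_cons_some (f := fcPair cats) (b := (k, q.2)) (by simp only [fcPair, hfc, Option.map_none, Option.map_some]),
                List.filter_cons, List.filter_cons]
            cases hk : (((k, q.2) : String × String).1 == c)
            · simp only [Bool.false_eq_true, if_false]
              exact ih
            · simp only [if_true, ite_true]
              exact congrArg _ ih
      · have hcc : (((cat, q.2) : String × String).1 == c) = false := by simp [Ne.symm hc]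
        rw [List.filterMap_cons_some (b := (cat, q.2)) (by simp only [fcPair, firstCategory, h, eq_self_iff_true, if_true, Option.map_some]),
            List.filter_cons, List.filter_cons]
        simp only [h, hcc, Bool.not_true, Bool.false_eq_true, if_false]
        exact ih

lemma sweepTags_filter (cats : List (String × List String)) (hnd : (cats.map (fun p => p.1)).Nodup)
    (c : String) (pool : List (String × String)) :
    (sweepTags cats pool).filter (fun q => q.1 == c)
      = (pool.filterMap (fcPair cats)).filter (fun q => q.1 == c) := by
  induction cats generalizing pool with
  | nil => simp [sweepTags, fcPair, firstCategory]
  | cons p cats ih =>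
      obtain ⟨cat, kws⟩ := p
      simp only [List.map_cons, List.nodup_cons] at hnd
      obtain ⟨hcat, hnd'⟩ := hnd
      rw [show sweepTags ((cat, kws) :: cats) pool
            = (pool.filter (fun q => kws.any (fun kw => PySem.Str.isIn kw q.1))).map (fun q => (cat, q.2))
              ++ sweepTags cats (pool.filter (fun q => !kws.any (fun kw => PySem.Str.isIn kw q.1))) from rfl,
          List.filter_append]
      by_cases hc : c = cat
      · subst hc
        rw [filterMap_fcPair_filter_self c kws cats hcat]
        have h2 : (sweepTags cats (pool.filter (fun q => !kws.any (fun kw => PySem.Str.isIn kw q.1)))).filter (fun q => q.1 == c) = [] := by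
          rw [List.filter_eq_nil_iff]
          intro q hq
          have := sweepTags_cat_mem cats _ q hq
          simp only [beq_iff_eq]
          intro hqc
          exact hcat (hqc ▸ this)
        rw [h2, List.append_nil]
        have h1 : ((pool.filter (fun q => kws.any (fun kw => PySem.Str.isIn kw q.1))).map (fun q => ((c : String), q.2))).filter (fun q => q.1 == c)
            = (pool.filter (fun q => kws.any (fun kw => PySem.Str.isIn kw q.1))).map (fun q => (c, q.2)) := by
          rw [List.filter_map]
          congr 1
          rw [List.filter_eq_self]
          intro q _
          simp
        rw [h1]
      · rw [filterMap_fcPair_filter_other cat kws cats c hc, ← ih hnd']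
        have h1 : ((pool.filter (fun q => kws.any (fun kw => PySem.Str.isIn kw q.1))).map (fun q => ((cat : String), q.2))).filter (fun q => q.1 == c) = [] := by
          rw [List.filter_eq_nil_iff]
          intro q hq
          rcases List.mem_map.1 hq with ⟨r, _, rfl⟩
          simp [Ne.symm hc]
        rw [h1, List.nil_append]

lemma spool_tags (sections : List (String × List String)) :
    (((sections.map (fun sec => (PySem.Str.lower sec.1, PySem.Str.join " " sec.2))).filter
        (fun q => (firstCategory keywordMap q.1).isNone)).flatMap (fun q => sentencePairs q.2))
      = tags2 sections := by
  induction sections with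
  | nil => rfl
  | cons sec rest ih =>
      simp only [List.map_cons, List.filter_cons, tags2, List.flatMap_cons]
      cases hfc : firstCategory keywordMap (PySem.Str.lower sec.1) with
      | none =>
          simp only [hfc, Option.isNone_none, if_true, ite_true, List.flatMap_cons]
          rw [ih]
          rfl
      | some k =>
          simp only [hfc, Option.isNone_some, Bool.false_eq_true, if_false]
          rw [ih]
          rfl

-- B's title pool tags are A's tags1
lemma pool1_filterMap (sections : List (String × List String)) :
    (sections.map (fun sec => (PySem.Str.lower sec.1, PySem.Str.join " " sec.2))).filterMap (fcPair keywordMap)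
      = tags1 sections := by
  rw [List.filterMap_map]
  rfl

-- B's sentence pool tags are A's tags2
lemma spool_filterMap (sections : List (String × List String)) :
    (((sections.map (fun sec => (PySem.Str.lower sec.1, PySem.Str.join " " sec.2))).filter
        (fun q => (firstCategory keywordMap q.1).isNone)).flatMap (fun q =>
      ((PySem.Str.split? q.2 ".").getD []).filterMap (fun sent =>
        if PySem.Str.strip (PySem.Str.lower sent) = "" then none
        else some (PySem.Str.strip (PySem.Str.lower sent), PySem.Str.strip sent)))).filterMap (fcPair keywordMap)
      = tags2 sections := by
  rw [List.filterMap_flatMap]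
  have hin : (fun (q : String × String) =>
      (((PySem.Str.split? q.2 ".").getD []).filterMap (fun sent =>
        if PySem.Str.strip (PySem.Str.lower sent) = "" then none
        else some (PySem.Str.strip (PySem.Str.lower sent), PySem.Str.strip sent))).filterMap (fcPair keywordMap))
      = (fun q => sentencePairs q.2) := by
    funext q
    rw [List.filterMap_filterMap]
    unfold sentencePairs
    have h2 : (fun sent => ((if PySem.Str.strip (PySem.Str.lower sent) = "" then none
          else some (PySem.Str.strip (PySem.Str.lower sent), PySem.Str.strip sent)).bind (fcPair keywordMap))) = gS := by
      funext sent
      by_cases h : PySem.Str.strip (PySem.Str.lower sent) = "" <;> simp [gS, fcPair, h]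
    rw [h2]
  rw [hin]
  exact spool_tags sections

lemma nodup_keys_kwm : (keywordMap.map (fun p => p.1)).Nodup := by decide

lemma clB_keys_mem (pool spool : List (String × String)) :
    ∀ q ∈ sweepTags keywordMap pool ++ sweepTags keywordMap spool, q.1 ∈ keywordMap.map (fun p => p.1) := by
  intro q hq
  rcases List.mem_append.1 hq with h | h
  · exact sweepTags_cat_mem _ _ q h
  · exact sweepTags_cat_mem _ _ q h

lemma nodup_fold_keys (l : List (String × String)) (h : ∀ q ∈ l, q.1 ∈ keywordMap.map (fun p => p.1)) :
    (l.foldl mstep initMapped).keys.Nodup := by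
  rw [keys_m2 l h]; decide

-- the common items-map form of both outputs
lemma out_items_eq (l : List (String × String)) (h : ∀ q ∈ l, q.1 ∈ keywordMap.map (fun p => p.1)) :
    (l.foldl mstep initMapped).items.map (fun p => (p.1, PySem.Str.join " " (PySem.List.sorted p.2 (fun x => x) false)))
      = (keywordMap.map (fun p => p.1)).map (fun c => (c, PySem.Str.join " "
          (PySem.List.sorted (((l.filter (fun q => q.1 == c)).map (fun q => q.2)).foldl PySem.Set.add []) (fun x => x) false))) := by
  rw [PySem.Dict.items_eq_map_keys _ (nodup_fold_keys l h) ([] : PySem.Set String), keys_m2 l h, List.map_map]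
  apply List.map_congr_left
  intro c hc
  simp only [Function.comp]
  rw [getD_foldl_mstep, getD_initMapped hc]

-- ===== VERDICT (by name: the statement is the Claim_ definition above) =====
theorem map_sections_spec : Claim_equal_map_sections := by
  intro sections condition_name _hdom
  unfold Spec_map_sections
  simp only [map_sections, map_sections_alt]
  rw [m2_eq]
  rw [claimSweep_eq, initClaimed_eq]
  rw [claimSweep_eq]
  simp only []
  rw [← List.foldl_append]
  rw [out_items_eq _ (tags_keys_mem sections), out_items_eq _ (clB_keys_mem _ _)]
  apply List.map_congr_left
  intro c _
  have hseq : ((tags1 sections ++ tags2 sections).filter (fun q => q.1 == c))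
      = ((sweepTags keywordMap (sections.map (fun sec => (PySem.Str.lower sec.1, PySem.Str.join " " sec.2)))
          ++ sweepTags keywordMap (((sections.map (fun sec => (PySem.Str.lower sec.1, PySem.Str.join " " sec.2))).filter
              (fun q => (firstCategory keywordMap q.1).isNone)).flatMap (fun q =>
            ((PySem.Str.split? q.2 ".").getD []).filterMap (fun sent =>
              if PySem.Str.strip (PySem.Str.lower sent) = "" then none
              else some (PySem.Str.strip (PySem.Str.lower sent), PySem.Str.strip sent))))).filter (fun q => q.1 == c)) := by
    rw [List.filter_append, List.filter_append,
        sweepTags_filter keywordMap nodup_keys_kwm c,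
        sweepTags_filter keywordMap nodup_keys_kwm c,
        pool1_filterMap, spool_filterMap]
  rw [hseq]
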